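-- pv_equiv track=rewrite | github.com/Xudong07/some_code | python/dynamic_programming_greedy/matrix_mul.py | num_of_sches_top_down
-- ===== SOURCE A (Python) =====
-- def num_of_sches_top_down(n, r):
--     if n==1:
--         return 1
--     else:
--         if r[n-1] > 0:
--             return r[n-1]
--         q = 0
--         for i in range(n-1):
--             q = q + num_of_sches_top_down(i+1, r)*num_of_sches_top_down(n-i-1, r)
--         r[n-1] = q
--         return r[n-1]
-- ===== SOURCE B (Python) =====
-- def num_of_sches_top_down(n, r):
--     # Bottom-up DP (no recursion); honours pre-seeded positive memo entries in r.
--     # Unlike A it does not write computed values back into r (return value only).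
--     if n == 1:
--         return 1
--     if r[n-1] > 0:
--         return r[n-1]
--     v = [1]
--     for k in range(2, n + 1):
--         c = r[k-1]
--         if c <= 0:
--             c = sum(v[i] * v[k-2-i] for i in range(k-1))
--         v.append(c)
--     return v[n-1]
-- ===== Notes on version B (the rewrite author's own statement) =====
-- stated objective: alternative
-- what changed: Replaces A's top-down memoized recursion (which also writes computed values back into r) with an iterative bottom-up dynamic program that fills the table k=2..n in one loop, honouring pre-seeded positive entries of r; the closed-form Catalan number the reviewer suggested cannot match because positive entries of r override the recurrence.
-- intended difference: For n = 0 with nonempty r and no positive memo entry at the wrapped index -1, A's empty loop plus negative-index write/read returns 0, while B returns 1, the intended single parenthesization of an empty product. — e.g. on num_of_sches_top_down(0, [0]): A returns 0, B returns 1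
-- outside the precondition, e.g. on num_of_sches_top_down(-1, [0, 0]): A returns 0, B raises IndexError
import Mathlib
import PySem

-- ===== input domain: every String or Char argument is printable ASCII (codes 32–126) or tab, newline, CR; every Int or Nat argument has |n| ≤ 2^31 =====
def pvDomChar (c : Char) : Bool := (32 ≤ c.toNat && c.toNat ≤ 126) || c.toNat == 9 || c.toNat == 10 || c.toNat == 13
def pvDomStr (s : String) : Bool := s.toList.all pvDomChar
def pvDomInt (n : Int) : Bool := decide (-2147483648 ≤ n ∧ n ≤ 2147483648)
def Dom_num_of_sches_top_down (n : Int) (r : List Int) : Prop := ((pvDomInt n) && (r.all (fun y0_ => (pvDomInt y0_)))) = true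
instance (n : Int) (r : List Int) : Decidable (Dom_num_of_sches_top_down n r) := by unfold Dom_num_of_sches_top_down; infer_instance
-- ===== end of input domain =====

-- B replaces A's memoized recursion by an iterative bottom-up dynamic program; return value
-- only: A also writes computed entries back into the memo list r, B does not mutate r.

-- ===== PORT A =====
-- A's recursion threads the mutated memo list r; the fuel argument (n.toNat at the top call)
-- is a totality guard only: every recursive call has a strictly smaller first argument.
def pvALoop (rec : Int → List Int → Option (Int × List Int)) (n : Int) :
    List Int → Int → List Int → Option (Int × List Int)
  | [], q, r =>
    match PySem.List.pySet? r (n - 1) q with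
    | none => none
    | some r' =>
      match PySem.List.pyGet? r' (n - 1) with
      | none => none
      | some v => some (v, r')
  | i :: is, q, r =>
    match rec (i + 1) r with
    | none => none
    | some (a, r1) =>
      match rec (n - i - 1) r1 with
      | none => none
      | some (b, r2) => pvALoop rec n is (q + a * b) r2

def pvAFuel : Nat → Int → List Int → Option (Int × List Int)
  | fuel, n, r =>
    if n = 1 then some (1, r)
    else
      match fuel with
      | 0 => none
      | f + 1 =>
        match PySem.List.pyGet? r (n - 1) with
        | none => none
        | some v =>
          if v > 0 then some (v, r)
          else pvALoop (pvAFuel f) n (PySem.List.pyRange 0 (n - 1) 1) 0 r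

def num_of_sches_top_down (n : Int) (r : List Int) : Int :=
  match pvAFuel (n.toNat + 1) n r with
  | some (v, _) => v
  | none => 0

-- ===== PORT B =====
def num_of_sches_top_down_alt (n : Int) (r : List Int) : Int :=
  if n = 1 then 1
  else
    let c0 := PySem.List.pyGetD r (n - 1) 0
    if c0 > 0 then c0
    else
      let v := (PySem.List.pyRange 2 (n + 1) 1).foldl (fun v k =>
        let c := PySem.List.pyGetD r (k - 1) 0
        let c := if c ≤ 0 then
            (PySem.List.pyRange 0 (k - 1) 1).foldl
              (fun s i => s + PySem.List.pyGetD v i 0 * PySem.List.pyGetD v (k - 2 - i) 0) 0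
          else c
        v ++ [c]
      ) [1]
      PySem.List.pyGetD v (n - 1) 0

-- ===== PRECONDITION & SPEC =====
-- Pre_ excludes n > len(r) and (n = 0, r = []), where A raises IndexError, and n < 0 with no
-- positive memo entry at the wrapped index n-1, where B raises IndexError while A's return
-- is a negative-index wraparound artefact.
def Pre_num_of_sches_top_down (n : Int) (r : List Int) : Prop :=
  n = 1 ∨ (2 ≤ n ∧ n ≤ (r.length : Int)) ∨ (n = 0 ∧ r ≠ []) ∨
    (n < 0 ∧ -(r.length : Int) ≤ n - 1 ∧ 0 < PySem.List.pyGetD r (n - 1) 0)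
instance (n : Int) (r : List Int) : Decidable (Pre_num_of_sches_top_down n r) := by
  unfold Pre_num_of_sches_top_down; infer_instance

def pvWitness_num_of_sches_top_down : Int × List Int := (3, [0, 0, 0])

-- For n = 0 with nonempty r and no positive memo entry at the wrapped index -1, A's loop over
-- range(-1) is empty and its negative-index write/read returns 0, while B returns 1 (its
-- one-element base table), the intended value of the empty product's single parenthesization.
def D_num_of_sches_top_down (n : Int) (r : List Int) : Prop :=
  n = 0 ∧ r ≠ [] ∧ PySem.List.pyGetD r (-1) 0 ≤ 0
instance (n : Int) (r : List Int) : Decidable (D_num_of_sches_top_down n r) := by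
  unfold D_num_of_sches_top_down; infer_instance

def Spec_num_of_sches_top_down (n : Int) (r : List Int) (out : Int) : Prop :=
  ¬ D_num_of_sches_top_down n r → out = num_of_sches_top_down_alt n r
instance (n : Int) (r : List Int) (out : Int) : Decidable (Spec_num_of_sches_top_down n r out) := by
  unfold Spec_num_of_sches_top_down; infer_instance

def pvDiffWitness_num_of_sches_top_down : Int × List Int := (0, [0])
def pvDiffWitnessOut_num_of_sches_top_down : Int × Int := (0, 1)

-- ===== CLAIM (what is proved, stated in full; the proofs are below) =====
def Claim_unchanged_num_of_sches_top_down : Prop :=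
  ∀ (n : Int) (r : List Int), Dom_num_of_sches_top_down n r →
    Pre_num_of_sches_top_down n r →
    Spec_num_of_sches_top_down n r (num_of_sches_top_down n r)
def Claim_changed_num_of_sches_top_down : Prop :=
  Dom_num_of_sches_top_down (pvDiffWitness_num_of_sches_top_down.1) (pvDiffWitness_num_of_sches_top_down.2) ∧
  Pre_num_of_sches_top_down (pvDiffWitness_num_of_sches_top_down.1) (pvDiffWitness_num_of_sches_top_down.2) ∧
  D_num_of_sches_top_down (pvDiffWitness_num_of_sches_top_down.1) (pvDiffWitness_num_of_sches_top_down.2) ∧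
  num_of_sches_top_down (pvDiffWitness_num_of_sches_top_down.1) (pvDiffWitness_num_of_sches_top_down.2) = pvDiffWitnessOut_num_of_sches_top_down.1 ∧
  num_of_sches_top_down_alt (pvDiffWitness_num_of_sches_top_down.1) (pvDiffWitness_num_of_sches_top_down.2) = pvDiffWitnessOut_num_of_sches_top_down.2 ∧
  pvDiffWitnessOut_num_of_sches_top_down.1 ≠ pvDiffWitnessOut_num_of_sches_top_down.2
def Claim_exact_num_of_sches_top_down : Prop :=
  ∀ (n : Int) (r : List Int), Dom_num_of_sches_top_down n r →
    Pre_num_of_sches_top_down n r → D_num_of_sches_top_down n r →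
    num_of_sches_top_down n r ≠ num_of_sches_top_down_alt n r

-- ===== LEMMAS AND PROOFS =====

-- pvVal r0 k is the value both programs assign to subproblem k: 1 for k = 1, a pre-seeded
-- positive memo entry r0[k-1] if present, otherwise the convolution of smaller subproblems.
def pvV (r0 : List Int) : Nat → Nat → Int
  | 0, _ => 1
  | f + 1, k =>
    if k ≤ 1 then 1
    else
      if 0 < r0.getD (k - 1) 0 then r0.getD (k - 1) 0
      else (List.range (k - 1)).foldl
        (fun q i => q + pvV r0 f (i + 1) * pvV r0 f (k - 1 - i)) 0

def pvVal (r0 : List Int) (k : Nat) : Int := pvV r0 k k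

theorem pvV_irrel (r0 : List Int) : ∀ f g k, k ≤ f → k ≤ g → pvV r0 f k = pvV r0 g k := by
  intro f
  induction f with
  | zero =>
    intro g k hf _
    have : k = 0 := by omega
    subst this
    cases g <;> simp [pvV]
  | succ f ih =>
    intro g k hf hg
    match g, hg with
    | 0, hg =>
      have : k = 0 := by omega
      subst this
      simp [pvV]
    | g' + 1, hg =>
      by_cases hk : k ≤ 1
      · simp [pvV, hk]
      · simp only [pvV, hk, if_false]
        by_cases hc : 0 < r0.getD (k-1) 0
        · rw [if_pos hc, if_pos hc]
        · rw [if_neg hc, if_neg hc]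
          apply PySem.List.foldl_congr_mem
          intro acc x hx
          have hx' : x < k - 1 := List.mem_range.mp hx
          rw [ih g' (x+1) (by omega) (by omega), ih g' (k-1-x) (by omega) (by omega)]

theorem pvV_eq_val (r0 : List Int) (f k : Nat) (h : k ≤ f) : pvV r0 f k = pvVal r0 k :=
  pvV_irrel r0 f k k h le_rfl

theorem foldl_add_ge (t : Nat → Int) : ∀ (l : List Nat) (q : Int), (∀ i ∈ l, 1 ≤ t i) →
    q + l.length ≤ l.foldl (fun q i => q + t i) q := by
  intro l
  induction l with
  | nil => simp
  | cons x xs ih =>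
    intro q h
    have h1 : 1 ≤ t x := h x (by simp)
    have := ih (q + t x) (fun i hi => h i (by simp [hi]))
    simp only [List.foldl_cons, List.length_cons]
    push_cast at *
    omega

theorem pvVal_pos (r0 : List Int) : ∀ k, 1 ≤ k → 1 ≤ pvVal r0 k := by
  intro k
  induction k using Nat.strong_induction_on with
  | _ k ih =>
    intro hk
    by_cases hk1 : k ≤ 1
    · have : k = 1 := by omega
      subst this
      simp [pvVal, pvV]
    · unfold pvVal
      show 1 ≤ pvV r0 k k
      rw [show k = (k-1)+1 by omega]
      simp only [pvV]
      rw [show (k-1)+1 = k by omega]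
      simp only [hk1, if_false]
      by_cases hc : 0 < r0.getD (k-1) 0
      · rw [if_pos hc]; omega
      · rw [if_neg hc]
        have hterm : ∀ i ∈ List.range (k-1), 1 ≤ pvV r0 (k-1) (i+1) * pvV r0 (k-1) (k-1-i) := by
          intro i hi
          have hi' : i < k - 1 := List.mem_range.mp hi
          rw [pvV_eq_val r0 _ _ (by omega), pvV_eq_val r0 _ _ (by omega)]
          have a := ih (i+1) (by omega) (by omega)
          have b := ih (k-1-i) (by omega) (by omega)
          nlinarith
        have := foldl_add_ge (fun i => pvV r0 (k-1) (i+1) * pvV r0 (k-1) (k-1-i)) (List.range (k-1)) 0 hterm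
        simp only [List.length_range] at this
        omega

theorem pvVal_miss (r0 : List Int) (k : Nat) (hk : 2 ≤ k) (hc : ¬ 0 < r0.getD (k-1) 0) :
    pvVal r0 k = (List.range (k-1)).foldl
      (fun q i => q + pvVal r0 (i+1) * pvVal r0 (k-1-i)) 0 := by
  conv_lhs => rw [pvVal, show k = (k-1)+1 by omega]
  rw [pvV]
  rw [show (k-1)+1 = k by omega]
  rw [if_neg (by omega : ¬ k ≤ 1), if_neg hc]
  apply PySem.List.foldl_congr_mem
  intro acc x hx
  have hx' : x < k - 1 := List.mem_range.mp hx
  rw [pvV_eq_val r0 (k-1) (x+1) (by omega), pvV_eq_val r0 (k-1) (k-1-x) (by omega)]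

theorem pvVal_hit (r0 : List Int) (k : Nat) (hk : 2 ≤ k) (hc : 0 < r0.getD (k-1) 0) :
    pvVal r0 k = r0.getD (k-1) 0 := by
  conv_lhs => rw [pvVal, show k = (k-1)+1 by omega]
  rw [pvV]
  rw [show (k-1)+1 = k by omega]
  rw [if_neg (by omega : ¬ k ≤ 1), if_pos hc]

-- memo invariant for A: every entry of the threaded list is either the original entry or the
-- computed value of its subproblem
def pvInv (r0 r : List Int) : Prop :=
  r.length = r0.length ∧
  ∀ j, j < r.length → (r.getD j 0 = r0.getD j 0 ∨ r.getD j 0 = pvVal r0 (j + 1))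

theorem pvA_correct (r0 : List Int) : ∀ f (n : Int) (r : List Int), n.toNat ≤ f →
    1 ≤ n → n ≤ (r0.length : Int) → pvInv r0 r →
    ∃ r', pvAFuel f n r = some (pvVal r0 n.toNat, r') ∧ pvInv r0 r' := by
  intro f
  induction f with
  | zero =>
    intro n r hf h1 h2 hinv
    have : n = 1 := by omega
    subst this
    exact ⟨r, by simp [pvAFuel, pvVal, pvV], hinv⟩
  | succ f ih =>
    intro n r hf h1 h2 hinv
    by_cases hn1 : n = 1
    · subst hn1
      exact ⟨r, by simp [pvAFuel, pvVal, pvV], hinv⟩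
    · have hn2 : 2 ≤ n := by omega
      set k := n.toNat with hk
      have hk2 : 2 ≤ k := by omega
      have hlen : r.length = r0.length := hinv.1
      have hjlt : k - 1 < r.length := by omega
      have hget : PySem.List.pyGet? r (n - 1) = some (r.getD (k-1) 0) := by
        rw [PySem.List.pyGet?_of_nonneg r (by omega : (0:Int) ≤ n - 1)]
        rw [show (n-1).toNat = k - 1 by omega]
        simp [List.getD, List.getElem?_eq_getElem hjlt]
      have hmemo := hinv.2 (k-1) hjlt
      rw [show k - 1 + 1 = k by omega] at hmemo
      simp only [pvAFuel, hn1, if_false, hget]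
      by_cases hpos : r.getD (k-1) 0 > 0
      · -- memo hit
        rw [if_pos hpos]
        refine ⟨r, ?_, hinv⟩
        have : r.getD (k-1) 0 = pvVal r0 k := by
          rcases hmemo with h | h
          · rw [h] at hpos ⊢
            exact (pvVal_hit r0 k hk2 hpos).symm
          · exact h
        rw [this]
      · -- memo miss
        rw [if_neg hpos]
        have horig : r.getD (k-1) 0 = r0.getD (k-1) 0 := by
          rcases hmemo with h | h
          · exact h
          · exfalso; have := pvVal_pos r0 k (by omega); omega
        have hc0 : ¬ (0 < r0.getD (k-1) 0) := by omega
        have hval := pvVal_miss r0 k hk2 hc0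
        have hloop : ∀ (l : List Int) (q : Int) (r1 : List Int), pvInv r0 r1 →
            (∀ i ∈ l, 0 ≤ i ∧ i < n - 1) →
            q + (l.map (fun i => pvVal r0 (i+1).toNat * pvVal r0 (n-i-1).toNat)).sum
              = pvVal r0 k →
            ∃ r', pvALoop (pvAFuel f) n l q r1 = some (pvVal r0 k, r') ∧ pvInv r0 r' := by
          intro l
          induction l with
          | nil =>
            intro q r1 hinv1 _ hq
            simp only [List.map_nil, List.sum_nil, add_zero] at hq
            subst hq
            have hlen1 : r1.length = r0.length := hinv1.1
            have hjlt1 : k - 1 < r1.length := by omega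
            have hset : PySem.List.pySet? r1 (n-1) (pvVal r0 k)
                = some (r1.set (k-1) (pvVal r0 k)) := by
              rw [show (n-1 : Int) = ((k-1 : Nat) : Int) by omega]
              exact PySem.List.pySet?_natCast r1 (k-1) _ hjlt1
            have hget2 : PySem.List.pyGet? (r1.set (k-1) (pvVal r0 k)) (n-1)
                = some (pvVal r0 k) := by
              rw [PySem.List.pyGet?_of_nonneg _ (by omega : (0:Int) ≤ n - 1)]
              rw [show (n-1).toNat = k - 1 by omega]
              rw [List.getElem?_set_self (by simpa using hjlt1)]
            refine ⟨r1.set (k-1) (pvVal r0 k), ?_, ?_⟩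
            · simp only [pvALoop, hset, hget2]
            · constructor
              · simpa using hlen1
              · intro j hj
                simp only [List.length_set] at hj
                by_cases hjk : j = k - 1
                · subst hjk
                  right
                  rw [show k - 1 + 1 = k by omega]
                  simp [List.getD, List.getElem?_set_self (h := hjlt1)]
                · have := hinv1.2 j hj
                  simpa [List.getD, List.getElem?_set_ne (by omega : k-1 ≠ j)] using this
          | cons i is ihl =>
            intro q r1 hinv1 hmem hq
            have hi := hmem i (by simp)
            obtain ⟨ra, hra, hinva⟩ := ih (i+1) r1 (by omega) (by omega) (by omega) hinv1
            obtain ⟨rb, hrb, hinvb⟩ := ih (n-i-1) ra (by omega) (by omega) (by omega) hinva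
            simp only [pvALoop, hra, hrb]
            apply ihl _ _ hinvb (fun x hx => hmem x (by simp [hx]))
            simp only [List.map_cons, List.sum_cons] at hq
            linarith [hq]
        apply hloop
        · exact hinv
        · intro i hi
          exact ⟨(PySem.List.mem_pyRange_one.mp hi).1, (PySem.List.mem_pyRange_one.mp hi).2⟩
        · rw [hval]
          rw [show (n - 1 : Int) = ((k-1 : Nat) : Int) by omega]
          rw [PySem.List.pyRange_zero_natCast]
          rw [List.map_map]
          rw [PySem.List.foldl_add]
          simp only [zero_add]
          congr 1
          apply List.map_congr_left
          intro x hx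
          have hx' : x < k - 1 := List.mem_range.mp hx
          show pvVal r0 (((x:Int) + 1)).toNat * pvVal r0 ((n - (x:Int) - 1)).toNat
              = pvVal r0 (x + 1) * pvVal r0 (k - 1 - x)
          rw [show ((x:Int)+1).toNat = x + 1 by omega,
              show (n - (x:Int) - 1).toNat = k - 1 - x by omega]

theorem pvVal_one (r : List Int) : pvVal r 1 = 1 := by simp [pvVal, pvV]

theorem pvB_loop (r : List Int) : ∀ m : Nat,
    (PySem.List.pyRange 2 ((m:Int) + 2) 1).foldl (fun v k =>
        let c := PySem.List.pyGetD r (k - 1) 0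
        let c := if c ≤ 0 then
            (PySem.List.pyRange 0 (k - 1) 1).foldl
              (fun s i => s + PySem.List.pyGetD v i 0 * PySem.List.pyGetD v (k - 2 - i) 0) 0
          else c
        v ++ [c]) [1]
      = (List.range (m+1)).map (fun j => pvVal r (j+1)) := by
  intro m
  induction m with
  | zero =>
    simp [PySem.List.pyRange, pvVal_one]
  | succ m ihm =>
    have hcast : ((m+1 : Nat) : Int) + 2 = ((m:Int) + 2) + 1 := by push_cast; ring
    rw [hcast, PySem.List.pyRange_one_succ_right (by omega), List.foldl_append]
    rw [ihm]
    simp only [List.foldl_cons, List.foldl_nil]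
    set prev := (List.range (m+1)).map (fun j => pvVal r (j+1)) with hprev
    have hc : PySem.List.pyGetD r ((m:Int) + 2 - 1) 0 = r.getD (m+1) 0 := by
      rw [show ((m:Int) + 2 - 1) = ((m+1 : Nat) : Int) by push_cast; ring]
      exact PySem.List.pyGetD_natCast r (m+1) 0
    have htail : (List.range (m+1+1)).map (fun j => pvVal r (j+1))
        = prev ++ [pvVal r (m+2)] := by
      rw [List.range_succ, List.map_append]
      rfl
    rw [htail]
    congr 1
    rw [hc]
    by_cases hpos : r.getD (m+1) 0 ≤ 0
    · rw [if_pos hpos]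
      have hmiss := pvVal_miss r (m+2) (by omega) (by rw [show m+2-1 = m+1 by omega]; omega)
      rw [show m + 2 - 1 = m + 1 by omega] at hmiss
      rw [hmiss]
      congr 1
      rw [show ((m:Int) + 2 - 1) = ((m+1 : Nat) : Int) by push_cast; ring]
      rw [PySem.List.pyRange_zero_natCast, List.foldl_map]
      apply PySem.List.foldl_congr_mem
      intro acc x hx
      have hx' : x < m + 1 := List.mem_range.mp hx
      have e1 : PySem.List.pyGetD prev ((x:Nat) : Int) 0 = pvVal r (x+1) := by
        rw [PySem.List.pyGetD_natCast, hprev, PySem.List.getD_map_range _ _ _ _ hx']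
      have e2 : PySem.List.pyGetD prev ((m:Int) + 2 - 2 - (x:Int)) 0 = pvVal r (m-x+1) := by
        rw [show ((m:Int) + 2 - 2 - (x:Int)) = ((m - x : Nat) : Int) by omega]
        rw [PySem.List.pyGetD_natCast, hprev, PySem.List.getD_map_range _ _ _ _ (by omega)]
      rw [e1, e2]
      rw [show m + 1 - x = m - x + 1 by omega]
    · rw [if_neg hpos]
      have hh := pvVal_hit r (m+2) (by omega) (by rw [show m+2-1 = m+1 by omega]; omega)
      rw [hh, show m+2-1 = m+1 by omega]

theorem pvB_correct (n : Int) (r : List Int) (h1 : 1 ≤ n) (h2 : n ≤ (r.length : Int)) :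
    num_of_sches_top_down_alt n r = pvVal r n.toNat := by
  by_cases hn1 : n = 1
  · subst hn1
    simp [num_of_sches_top_down_alt, pvVal_one]
  · have hn2 : 2 ≤ n := by omega
    set k := n.toNat with hk
    have hk2 : 2 ≤ k := by omega
    have hjlt : k - 1 < r.length := by omega
    have hc0 : PySem.List.pyGetD r (n - 1) 0 = r.getD (k-1) 0 := by
      rw [show (n - 1 : Int) = ((k-1 : Nat) : Int) by omega]
      exact PySem.List.pyGetD_natCast r (k-1) 0
    simp only [num_of_sches_top_down_alt, hn1, if_false, hc0]
    by_cases hpos : r.getD (k-1) 0 > 0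
    · rw [if_pos hpos]
      exact (pvVal_hit r k hk2 hpos).symm
    · rw [if_neg hpos]
      have hm : (n + 1 : Int) = ((k - 1 : Nat) : Int) + 2 := by omega
      rw [hm, pvB_loop r (k-1)]
      rw [show k - 1 + 1 = k by omega]
      rw [show (n - 1 : Int) = ((k-1 : Nat) : Int) by omega]
      rw [PySem.List.pyGetD_natCast, PySem.List.getD_map_range _ _ _ _ (by omega)]
      rw [show k - 1 + 1 = k by omega]

-- lemmas for the wraparound (n ≤ 0) cases admitted by Pre_
theorem pvGet_hit (r : List Int) (i : Int) (h1 : -(r.length : Int) ≤ i) (h2 : i < (r.length : Int)) :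
    PySem.List.pyGet? r i = some (PySem.List.pyGetD r i 0) := by
  cases heq : PySem.List.pyGet? r i with
  | none =>
    rw [PySem.List.pyGet?_eq_none_iff] at heq
    exact absurd (by constructor <;> omega) heq
  | some v => simp [PySem.List.pyGetD, heq]

theorem pvA_hit (n : Int) (r : List Int) (hn : n ≤ 0) (hlo : -(r.length : Int) ≤ n - 1)
    (hc : 0 < PySem.List.pyGetD r (n - 1) 0) :
    num_of_sches_top_down n r = PySem.List.pyGetD r (n - 1) 0 := by
  unfold num_of_sches_top_down
  rw [show n.toNat + 1 = 1 by omega]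
  simp only [pvAFuel, if_neg (by omega : ¬ n = 1), pvGet_hit r (n - 1) hlo (by omega), if_pos hc]

theorem pvB_hit (n : Int) (r : List Int) (hn : ¬ n = 1) (hc : 0 < PySem.List.pyGetD r (n - 1) 0) :
    num_of_sches_top_down_alt n r = PySem.List.pyGetD r (n - 1) 0 := by
  simp only [num_of_sches_top_down_alt, if_neg hn, if_pos hc]

theorem pvA_zero (r : List Int) (hr : r ≠ []) (hc : PySem.List.pyGetD r (-1) 0 ≤ 0) :
    num_of_sches_top_down 0 r = 0 := by
  have hlen : 0 < r.length := List.length_pos_iff.mpr hr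
  have hset : PySem.List.pySet? r (0 - 1) (0 : Int) = some (r.set (r.length - 1) 0) := by
    unfold PySem.List.pySet? PySem.List.pyIdx?
    have h2 : -(r.length : Int) ≤ 0 - 1 := by omega
    simp
    exact hr
  have hget : PySem.List.pyGet? (r.set (r.length - 1) 0) (0 - 1) = some (0 : Int) := by
    rw [show (0 - 1 : Int) = -1 by omega, PySem.List.pyGet?_neg_one, List.getLast?_eq_getElem?]
    simp [hlen]
  unfold num_of_sches_top_down
  simp only [pvAFuel, if_neg (by omega : ¬ (0:Int) = 1),
    pvGet_hit r (0 - 1) (by omega) (by omega),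
    if_neg (by rw [show (0-1:Int) = -1 by omega]; omega : ¬ PySem.List.pyGetD r ((0:Int) - 1) 0 > 0),
    PySem.List.pyRange_one_eq_nil (by omega : (0:Int) - 1 ≤ 0)]
  simp only [pvALoop, hset, hget]

theorem pvB_zero (r : List Int) (_hr : r ≠ []) (hc : PySem.List.pyGetD r (-1) 0 ≤ 0) :
    num_of_sches_top_down_alt 0 r = 1 := by
  simp only [num_of_sches_top_down_alt, if_neg (by omega : ¬ (0:Int) = 1),
    if_neg (by rw [show (0-1:Int) = -1 by omega]; omega : ¬ PySem.List.pyGetD r ((0:Int) - 1) 0 > 0)]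
  rw [PySem.List.pyRange_one_eq_nil (by omega : (0:Int) + 1 ≤ 2), List.foldl_nil]
  norm_num [PySem.List.pyGetD, PySem.List.pyGet?_neg_one]

-- ===== VERDICT (by name: the statement is the Claim_ definition above) =====
theorem num_of_sches_top_down_spec : Claim_unchanged_num_of_sches_top_down := by
  intro n r _ hpre hnd
  have hinv : pvInv r r := ⟨rfl, fun j _ => Or.inl rfl⟩
  rcases hpre with h1 | ⟨h2, hlen⟩ | ⟨h0, hr⟩ | ⟨hneg, hlo, hc⟩
  · subst h1
    simp [num_of_sches_top_down, pvAFuel, num_of_sches_top_down_alt]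
  · obtain ⟨r', hA, _⟩ := pvA_correct r (n.toNat + 1) n r (by omega) (by omega) hlen hinv
    rw [pvB_correct n r (by omega) hlen]
    unfold num_of_sches_top_down
    rw [hA]
  · subst h0
    have hc : 0 < PySem.List.pyGetD r (-1) 0 := by
      by_contra hle
      exact hnd ⟨rfl, hr, by omega⟩
    rw [pvA_hit 0 r le_rfl (by have := List.length_pos_iff.mpr hr; omega)
          (by rwa [show (0-1:Int) = -1 by omega]),
        pvB_hit 0 r (by omega) (by rwa [show (0-1:Int) = -1 by omega])]
  · rw [pvA_hit n r (by omega) hlo hc, pvB_hit n r (by omega) hc]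

theorem num_of_sches_top_down_changed : Claim_changed_num_of_sches_top_down := by
  unfold Claim_changed_num_of_sches_top_down; decide

theorem num_of_sches_top_down_tight : Claim_exact_num_of_sches_top_down := by
  intro n r _ _ hd
  obtain ⟨h0, hr, hc⟩ := hd
  subst h0
  rw [pvA_zero r hr hc, pvB_zero r hr hc]
  omega
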